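-- pv_equiv track=rewrite | github.com/gifted-professor/global-creator-screening | scripts/run_task_upload_to_final_export_pipeline.py | _aggregate_fan_out_status
-- ===== SOURCE A (Python) =====
-- from typing import Any
--
-- def _aggregate_fan_out_status(child_runs: list[dict[str, Any]]) -> str:
--     statuses = [str(item.get("status") or "").strip() for item in child_runs if str(item.get("status") or "").strip()]
--     if not statuses:
--         return "failed"
--     if any(status == "failed" for status in statuses):
--         return "failed"
--     if len(set(statuses)) == 1:
--         return statuses[0]
--     if "completed_with_platform_failures" in statuses:
--         return "completed_with_platform_failures"
--     if "completed_with_partial_scrape" in statuses: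
--         return "completed_with_partial_scrape"
--     if "completed" in statuses:
--         return "completed"
--     if "staged_only" in statuses:
--         return "staged_only"
--     if "vision_probe_only" in statuses:
--         return "vision_probe_only"
--     return "completed"
-- ===== SOURCE B (Python) =====
-- _ORDER = [
--     "completed_with_platform_failures",
--     "completed_with_partial_scrape",
--     "completed",
--     "staged_only",
--     "vision_probe_only",
-- ]
-- _RANK = {s: i for i, s in enumerate(_ORDER)}
--
--
-- def _aggregate_fan_out_status(child_runs: list) -> str:
--     seen = set()
--     for item in child_runs:
--         s = str(item.get("status") or "").strip()
--         if s:
--             seen.add(s)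
--     if not seen or "failed" in seen:
--         return "failed"
--     ranks = [_RANK[s] for s in seen if s in _RANK]
--     if ranks:
--         return _ORDER[min(ranks)]
--     return next(iter(seen)) if len(seen) == 1 else "completed"
-- ===== Notes on version B (the rewrite author's own statement) =====
-- stated objective: alternative
-- what changed: Replaces A's sequential short-circuit membership chain (one list scan per known status) by a set built in one pass plus a priority-rank table reduced with min(), indexing the priority list by the minimal rank.
import Mathlib
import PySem

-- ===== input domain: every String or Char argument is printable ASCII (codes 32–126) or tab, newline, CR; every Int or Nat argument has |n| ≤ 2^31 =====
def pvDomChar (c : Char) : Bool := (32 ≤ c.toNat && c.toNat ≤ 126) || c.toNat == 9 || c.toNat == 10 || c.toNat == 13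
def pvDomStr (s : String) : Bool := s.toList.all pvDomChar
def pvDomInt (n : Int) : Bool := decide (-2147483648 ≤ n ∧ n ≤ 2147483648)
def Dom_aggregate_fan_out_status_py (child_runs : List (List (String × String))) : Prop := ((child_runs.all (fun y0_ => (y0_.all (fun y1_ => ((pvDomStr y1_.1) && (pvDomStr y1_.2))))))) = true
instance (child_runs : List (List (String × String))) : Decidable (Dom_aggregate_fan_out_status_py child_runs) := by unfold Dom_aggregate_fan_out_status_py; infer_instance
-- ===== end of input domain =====

-- B replaces A's sequential short-circuit membership chain by a rank table reduced with min()
-- over a set built in one pass (objective: alternative decomposition; same asymptotic cost).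

-- shared normalization: str(item.get("status") or "").strip()  (None and "" both give "")
def pvNorm (item : List (String × String)) : String :=
  PySem.Str.strip (((PySem.Dict.mk item).get? "status").getD "")

-- ===== PORT A =====
def aggregate_fan_out_status_py (child_runs : List (List (String × String))) : String :=
  let statuses := (child_runs.map pvNorm).filter (fun s => !(s == ""))
  if statuses = [] then "failed"
  else if statuses.any (fun status => status == "failed") then "failed"
  else if PySem.Set.len (PySem.Set.ofList statuses) = 1 then statuses.headD ""  -- statuses[0] on a nonempty list
  else if statuses.contains "completed_with_platform_failures" then "completed_with_platform_failures"
  else if statuses.contains "completed_with_partial_scrape" then "completed_with_partial_scrape"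
  else if statuses.contains "completed" then "completed"
  else if statuses.contains "staged_only" then "staged_only"
  else if statuses.contains "vision_probe_only" then "vision_probe_only"
  else "completed"

-- ===== PORT B =====
def pvORDER : List String :=
  ["completed_with_platform_failures", "completed_with_partial_scrape", "completed",
   "staged_only", "vision_probe_only"]

def pvRANK : PySem.Dict String Int :=
  PySem.Dict.ofList (pvORDER.zipIdx.map (fun p => (p.1, (p.2 : Int))))

def aggregate_fan_out_status_py_alt (child_runs : List (List (String × String))) : String :=
  let seen : PySem.Set String :=
    child_runs.foldl
      (fun acc item =>
        let s := pvNorm item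
        if s ≠ "" then PySem.Set.add acc s else acc)
      PySem.Set.empty
  if seen = [] ∨ PySem.Set.contains seen "failed" then "failed"
  else
    let ranks := seen.filterMap (fun s => pvRANK.get? s)
    if ranks ≠ [] then
      -- _ORDER[min(ranks)]: min(ranks) is a valid index, the getD 0/"" defaults are never hit
      (PySem.List.pyGet? pvORDER ((PySem.List.min? ranks (fun x => x)).getD 0)).getD ""
    else if PySem.Set.len seen = 1 then seen.headD ""  -- next(iter(seen)) on a 1-element set
    else "completed"

-- ===== PRECONDITION & SPEC =====
def Spec_aggregate_fan_out_status_py (child_runs : List (List (String × String))) (out : String) : Prop := out = aggregate_fan_out_status_py_alt child_runs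
instance (child_runs : List (List (String × String))) (out : String) : Decidable (Spec_aggregate_fan_out_status_py child_runs out) := by unfold Spec_aggregate_fan_out_status_py; infer_instance

-- ===== CLAIM (what is proved, stated in full; the proofs are below) =====
def Claim_equal_aggregate_fan_out_status_py : Prop := ∀ (child_runs : List (List (String × String))), Dom_aggregate_fan_out_status_py child_runs → Spec_aggregate_fan_out_status_py child_runs (aggregate_fan_out_status_py child_runs)

-- ===== LEMMAS AND PROOFS =====

-- B's one-pass conditional fold builds exactly set(statuses) for A's filtered list.
theorem pv_fold_eq_ofList (runs : List (List (String × String))) (acc : PySem.Set String) :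
    runs.foldl
      (fun acc item =>
        let s := pvNorm item
        if s ≠ "" then PySem.Set.add acc s else acc) acc
    = ((runs.map pvNorm).filter (fun s => !(s == ""))).foldl PySem.Set.add acc := by
  induction runs generalizing acc with
  | nil => rfl
  | cons r t ih =>
      simp only [List.foldl_cons, List.map_cons, List.filter_cons]
      by_cases h : pvNorm r = ""
      · simpa [h] using ih acc
      · simpa [h] using ih (PySem.Set.add acc (pvNorm r))

theorem pv_rank_cases (s : String) (r : Int) (h : pvRANK.get? s = some r) :
    (s = "completed_with_platform_failures" ∧ r = 0) ∨
    (s = "completed_with_partial_scrape" ∧ r = 1) ∨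
    (s = "completed" ∧ r = 2) ∨
    (s = "staged_only" ∧ r = 3) ∨
    (s = "vision_probe_only" ∧ r = 4) := by
  have hR : pvRANK = PySem.Dict.mk
      [("completed_with_platform_failures", 0), ("completed_with_partial_scrape", 1),
       ("completed", 2), ("staged_only", 3), ("vision_probe_only", 4)] := by decide
  rw [hR] at h
  simp only [PySem.Dict.get?_mk_cons] at h
  split_ifs at h with h1 h2 h3 h4 h5
  · exact Or.inl ⟨(eq_of_beq h1).symm, by simpa using h.symm⟩
  · exact Or.inr (Or.inl ⟨(eq_of_beq h2).symm, by simpa using h.symm⟩)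
  · exact Or.inr (Or.inr (Or.inl ⟨(eq_of_beq h3).symm, by simpa using h.symm⟩))
  · exact Or.inr (Or.inr (Or.inr (Or.inl ⟨(eq_of_beq h4).symm, by simpa using h.symm⟩)))
  · exact Or.inr (Or.inr (Or.inr (Or.inr ⟨(eq_of_beq h5).symm, by simpa using h.symm⟩)))
  · simp [PySem.Dict.get?] at h

-- which ranks the filterMap can contain, in terms of membership of the five keys
theorem pv_mem_ranks (S : List String) (r : Int) :
    r ∈ S.filterMap (fun s => pvRANK.get? s) ↔
    ((r = 0 ∧ "completed_with_platform_failures" ∈ S) ∨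
     (r = 1 ∧ "completed_with_partial_scrape" ∈ S) ∨
     (r = 2 ∧ "completed" ∈ S) ∨
     (r = 3 ∧ "staged_only" ∈ S) ∨
     (r = 4 ∧ "vision_probe_only" ∈ S)) := by
  constructor
  · intro h
    obtain ⟨s, hs, hg⟩ := List.mem_filterMap.mp h
    rcases pv_rank_cases s r hg with ⟨rfl, h⟩ | ⟨rfl, h⟩ | ⟨rfl, h⟩ | ⟨rfl, h⟩ | ⟨rfl, h⟩ <;> tauto
  · rintro (⟨rfl, h⟩ | ⟨rfl, h⟩ | ⟨rfl, h⟩ | ⟨rfl, h⟩ | ⟨rfl, h⟩) <;>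
      exact List.mem_filterMap.mpr ⟨_, h, by decide⟩

theorem pv_min_eq (ranks : List Int) (r₀ : Int) (hmem : r₀ ∈ ranks)
    (hlb : ∀ r ∈ ranks, r₀ ≤ r) :
    PySem.List.min? ranks (fun x => x) = some r₀ := by
  have hne : ranks ≠ [] := List.ne_nil_of_mem hmem
  obtain ⟨v, hv⟩ : ∃ v, PySem.List.min? ranks (fun x => x) = some v := by
    cases h : PySem.List.min? ranks (fun x => x) with
    | none => exact absurd ((PySem.List.min?_eq_none_iff ranks _).mp h) hne
    | some v => exact ⟨v, rfl⟩
  have h2 := PySem.List.min?_isMin hv r₀ hmem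
  have h3 := hlb v (PySem.List.min?_mem hv)
  rw [hv, le_antisymm h2 h3]

theorem pv_ofList_eq_nil (xs : List String) : (PySem.Set.ofList xs = []) ↔ xs = [] := by
  constructor
  · intro h; by_contra hne
    obtain ⟨a, t, rfl⟩ := List.exists_cons_of_ne_nil hne
    have : a ∈ PySem.Set.ofList (a :: t) := (PySem.Set.mem_ofList _ a).mpr (List.mem_cons_self ..)
    simp [h] at this
  · intro h; subst h; rfl

theorem pv_core (statuses : List String) :
    (if statuses = [] then "failed"
     else if statuses.any (fun status => status == "failed") then "failed"
     else if PySem.Set.len (PySem.Set.ofList statuses) = 1 then statuses.headD ""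
     else if statuses.contains "completed_with_platform_failures" then "completed_with_platform_failures"
     else if statuses.contains "completed_with_partial_scrape" then "completed_with_partial_scrape"
     else if statuses.contains "completed" then "completed"
     else if statuses.contains "staged_only" then "staged_only"
     else if statuses.contains "vision_probe_only" then "vision_probe_only"
     else "completed")
    =
    (let seen := PySem.Set.ofList statuses
     if seen = [] ∨ PySem.Set.contains seen "failed" then "failed"
     else
       let ranks := seen.filterMap (fun s => pvRANK.get? s)
       if ranks ≠ [] then
         (PySem.List.pyGet? pvORDER ((PySem.List.min? ranks (fun x => x)).getD 0)).getD ""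
       else if PySem.Set.len seen = 1 then seen.headD ""
       else "completed") := by
  set S := PySem.Set.ofList statuses with hS
  have hmemS : ∀ x, x ∈ S ↔ x ∈ statuses := fun x => PySem.Set.mem_ofList statuses x
  by_cases hnil : statuses = []
  · subst hnil; rfl
  have hSnil : ¬ (S = []) := fun h => hnil (pv_ofList_eq_nil statuses |>.mp h)
  by_cases hfail : "failed" ∈ statuses
  · have h1 : statuses.any (fun status => status == "failed") = true := by
      simpa using hfail
    have h2 : PySem.Set.contains S "failed" = true := by
      simpa [PySem.Set.contains] using (hmemS "failed").mpr hfail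
    rw [if_neg hnil, if_pos h1, if_pos (Or.inr h2)]
  have h1 : ¬ (statuses.any (fun status => status == "failed") = true) := by
    simpa using hfail
  have h2 : ¬ (PySem.Set.contains S "failed" = true) := by
    simp [PySem.Set.contains]
    intro hc; exact hfail ((hmemS "failed").mp hc)
  have hcond : ¬ (S = [] ∨ PySem.Set.contains S "failed" = true) := fun h => h.elim hSnil h2
  -- names for the five membership tests, via S
  set ranks := S.filterMap (fun s => pvRANK.get? s) with hranks
  have hmr : ∀ r, r ∈ ranks ↔
      ((r = 0 ∧ "completed_with_platform_failures" ∈ statuses) ∨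
       (r = 1 ∧ "completed_with_partial_scrape" ∈ statuses) ∨
       (r = 2 ∧ "completed" ∈ statuses) ∨
       (r = 3 ∧ "staged_only" ∈ statuses) ∨
       (r = 4 ∧ "vision_probe_only" ∈ statuses)) := by
    intro r
    rw [hranks, pv_mem_ranks]
    simp only [hmemS]
  by_cases hone : PySem.Set.len S = 1
  · -- all statuses equal: both sides return that single status
    have : S.length = 1 := by
      have := hone; simp [PySem.Set.len] at this; omega
    obtain ⟨a, ha⟩ := List.length_eq_one_iff.mp this
    have hall : ∀ x ∈ statuses, x = a := by
      intro x hx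
      have := (hmemS x).mpr hx
      simp [ha] at this; exact this
    have hhead : statuses.headD "" = a := by
      obtain ⟨h, t, rfl⟩ := List.exists_cons_of_ne_nil hnil
      simp [hall h (by simp)]
    have hamem : a ∈ statuses := by
      have : a ∈ S := by simp [ha]
      exact (hmemS a).mp this
    rw [if_neg hnil, if_neg h1, if_pos hone, hhead]
    rw [if_neg hcond, ha]
    cases hg : pvRANK.get? a with
    | some r =>
        have hrk : [a].filterMap (fun s => pvRANK.get? s) = [r] := by simp [hg]
        rw [if_pos (by simp [hrk])]
        rcases pv_rank_cases a r hg with ⟨rfl, rfl⟩ | ⟨rfl, rfl⟩ | ⟨rfl, rfl⟩ | ⟨rfl, rfl⟩ | ⟨rfl, rfl⟩ <;>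
          simp [hrk] <;> decide
    | none =>
        have hrk : [a].filterMap (fun s => pvRANK.get? s) = [] := by simp [hg]
        rw [if_neg (by simp [hrk])]
        rw [if_pos (by simp [PySem.Set.len])]
        rfl
  -- mixed statuses
  rw [if_neg hnil, if_neg h1, if_neg hone, if_neg hcond]
  have hbranch : ∀ (key : String) (r₀ : Int), key ∈ statuses → pvRANK.get? key = some r₀ →
      (∀ r ∈ ranks, r₀ ≤ r) →
      (if ranks ≠ [] then
         (PySem.List.pyGet? pvORDER ((PySem.List.min? ranks (fun x => x)).getD 0)).getD ""
       else if PySem.Set.len S = 1 then S.headD "" else "completed") =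
      (PySem.List.pyGet? pvORDER r₀).getD "" := by
    intro key r₀ hk hg hlb
    have hmem : r₀ ∈ ranks := List.mem_filterMap.mpr ⟨key, (hmemS key).mpr hk, hg⟩
    rw [if_pos (List.ne_nil_of_mem hmem), pv_min_eq ranks r₀ hmem hlb]
    rfl
  by_cases c0 : "completed_with_platform_failures" ∈ statuses
  · rw [if_pos (by simp [c0])]
    rw [hbranch _ 0 c0 (by decide) (fun r hr => by rcases (hmr r).mp hr with ⟨rfl,_⟩|⟨rfl,_⟩|⟨rfl,_⟩|⟨rfl,_⟩|⟨rfl,_⟩ <;> omega)]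
    decide
  rw [if_neg (by simpa using c0)]
  by_cases c1 : "completed_with_partial_scrape" ∈ statuses
  · rw [if_pos (by simp [c1])]
    rw [hbranch _ 1 c1 (by decide) (fun r hr => by rcases (hmr r).mp hr with ⟨rfl,hm⟩|⟨rfl,_⟩|⟨rfl,_⟩|⟨rfl,_⟩|⟨rfl,_⟩ <;> first | omega | exact absurd hm c0)]
    decide
  rw [if_neg (by simpa using c1)]
  by_cases c2 : "completed" ∈ statuses
  · rw [if_pos (by simp [c2])]
    rw [hbranch _ 2 c2 (by decide) (fun r hr => by rcases (hmr r).mp hr with ⟨rfl,hm⟩|⟨rfl,hm⟩|⟨rfl,_⟩|⟨rfl,_⟩|⟨rfl,_⟩ <;> first | omega | exact absurd hm c0 | exact absurd hm c1)]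
    decide
  rw [if_neg (by simpa using c2)]
  by_cases c3 : "staged_only" ∈ statuses
  · rw [if_pos (by simp [c3])]
    rw [hbranch _ 3 c3 (by decide) (fun r hr => by rcases (hmr r).mp hr with ⟨rfl,hm⟩|⟨rfl,hm⟩|⟨rfl,hm⟩|⟨rfl,_⟩|⟨rfl,_⟩ <;> first | omega | exact absurd hm c0 | exact absurd hm c1 | exact absurd hm c2)]
    decide
  rw [if_neg (by simpa using c3)]
  by_cases c4 : "vision_probe_only" ∈ statuses
  · rw [if_pos (by simp [c4])]
    rw [hbranch _ 4 c4 (by decide) (fun r hr => by rcases (hmr r).mp hr with ⟨rfl,hm⟩|⟨rfl,hm⟩|⟨rfl,hm⟩|⟨rfl,hm⟩|⟨rfl,_⟩ <;> first | omega | exact absurd hm c0 | exact absurd hm c1 | exact absurd hm c2 | exact absurd hm c3)]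
    decide
  rw [if_neg (by simpa using c4)]
  have hrknil : ranks = [] := by
    rw [hranks]
    rw [List.filterMap_eq_nil_iff]
    intro s hsS
    cases hg : pvRANK.get? s with
    | none => rfl
    | some r =>
        exfalso
        have hsm := (hmemS s).mp hsS
        rcases pv_rank_cases s r hg with ⟨rfl,_⟩|⟨rfl,_⟩|⟨rfl,_⟩|⟨rfl,_⟩|⟨rfl,_⟩ <;> tauto
  rw [if_neg (not_not_intro hrknil), if_neg hone]

theorem aggregate_fan_out_status_py_spec : Claim_equal_aggregate_fan_out_status_py := by
  intro child_runs _
  unfold Spec_aggregate_fan_out_status_py aggregate_fan_out_status_py aggregate_fan_out_status_py_alt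
  rw [pv_fold_eq_ofList]
  exact pv_core _
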